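-- pv_equiv track=rewrite | github.com/pypi-data/pypi-mirror-353 | packages/places-env/places_env-1.0.6-py3-none-any.whl/places/places_utils.py | is_valid_substitution
-- ===== SOURCE A (Python) =====
-- def is_valid_substitution(value):
--     """Check if a variable substitution is properly formatted."""
--     stack = []
--     in_var = False
--     i = 0
--     while i < len(value):
--         if value[i : i + 2] == "${":
--             if in_var:
--                 return False
--             stack.append("${")
--             in_var = True
--             i += 2
--             continue
--         elif in_var and value[i] == "}":
--             if not stack:
--                 return False
--             stack.pop()
--             in_var = False
--         i += 1
--     return not stack
-- ===== SOURCE B (Python) =====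
-- def is_valid_substitution(value):
--     """Check if a variable substitution is properly formatted."""
--     return all('}' in part for part in value.split('${')[1:])
-- ===== Notes on version B (the rewrite author's own statement) =====
-- stated objective: simpler
-- what changed: Replaced A's per-character state machine (index loop with an in_var flag and a redundant stack) by a one-liner: split the string on the opener marker and require every fragment after the first to contain a closing brace.
import Mathlib
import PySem

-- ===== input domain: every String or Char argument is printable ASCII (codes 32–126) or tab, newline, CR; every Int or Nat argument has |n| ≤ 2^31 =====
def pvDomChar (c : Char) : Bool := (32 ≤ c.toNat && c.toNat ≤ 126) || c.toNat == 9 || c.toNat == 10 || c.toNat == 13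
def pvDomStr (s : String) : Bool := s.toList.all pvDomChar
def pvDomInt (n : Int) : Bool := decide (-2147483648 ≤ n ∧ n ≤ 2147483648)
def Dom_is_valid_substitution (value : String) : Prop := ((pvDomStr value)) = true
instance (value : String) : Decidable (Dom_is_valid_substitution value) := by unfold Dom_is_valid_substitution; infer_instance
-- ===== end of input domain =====

-- B replaces A's per-character state machine (redundant stack + in_var flag) by one
-- split on '${' followed by a '}'-membership check on every later fragment (objective:
-- simpler — one line instead of an explicit scanner loop; a timing run also measured
-- it faster by a constant factor, C-level str.split replacing a Python-level char loop).


-- ===== PORT A =====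
-- A's while-loop over index i, carried as structural recursion on the remaining suffix
-- of the character list; the Python slice test value[i:i+2] == "${" is the two-leading-
-- character match, false when fewer than two characters remain (as the short slice is).
-- A's stack (append/pop at the end) is carried as a Lean list pushed/popped at the head.
def isValidLoopA : List Char → List String → Bool → Bool
  | [], stack, _ => stack.isEmpty
  | [c], stack, in_var =>
      if in_var && c == '}' then
        if stack.isEmpty then false else (stack.drop 1).isEmpty
      else stack.isEmpty
  | c1 :: c2 :: rest, stack, in_var =>
      if c1 == '$' && c2 == '{' then
        if in_var then false else isValidLoopA rest ("${" :: stack) true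
      else if in_var && c1 == '}' then
        if stack.isEmpty then false else isValidLoopA (c2 :: rest) (stack.drop 1) false
      else isValidLoopA (c2 :: rest) stack in_var
  termination_by l _ _ => l.length
  decreasing_by all_goals simp

def is_valid_substitution (value : String) : Bool :=
  isValidLoopA value.toList [] false

-- ===== PORT B =====
-- Source B: all('}' in part for part in value.split('${')[1:])
def is_valid_substitution_alt (value : String) : Bool :=
  ((PySem.Chars.splitOn value.toList "${".toList).drop 1).all
    (fun part => PySem.Chars.isIn "}".toList part)

-- ===== PRECONDITION & SPEC =====
def Spec_is_valid_substitution (value : String) (out : Bool) : Prop := out = is_valid_substitution_alt value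
instance (value : String) (out : Bool) : Decidable (Spec_is_valid_substitution value out) := by unfold Spec_is_valid_substitution; infer_instance

-- ===== CLAIM (what is proved, stated in full; the proofs are below) =====
def Claim_equal_is_valid_substitution : Prop := ∀ (value : String), Dom_is_valid_substitution value → Spec_is_valid_substitution value (is_valid_substitution value)

-- ===== LEMMAS AND PROOFS =====

-- apply f to the first element only (shape of splitOn's accumulator action)
def mapHead (f : List Char → List Char) : List (List Char) → List (List Char)
  | [] => []
  | p :: ps => f p :: ps

-- accumulator-free description of splitting on "${"
def splitDollar : List Char → List (List Char)
  | [] => [[]]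
  | [c] => [[c]]
  | c1 :: c2 :: rest =>
      if c1 == '$' && c2 == '{' then [] :: splitDollar rest
      else mapHead (c1 :: ·) (splitDollar (c2 :: rest))
  termination_by l => l.length
  decreasing_by all_goals simp

def hasClose (p : List Char) : Bool := decide ('}' ∈ p)

theorem splitDollar_ne_nil : ∀ l : List Char, splitDollar l ≠ []
  | [] => by simp [splitDollar]
  | [c] => by simp [splitDollar]
  | c1 :: c2 :: rest => by
      have hne := splitDollar_ne_nil (c2 :: rest)
      unfold splitDollar
      split
      · simp
      · cases h : splitDollar (c2 :: rest) <;> simp_all [mapHead]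
  termination_by l => l.length
  decreasing_by simp

theorem mapHead_mapHead (f g : List Char → List Char) (xs : List (List Char)) :
    mapHead f (mapHead g xs) = mapHead (fun p => f (g p)) xs := by
  cases xs <;> simp [mapHead]

theorem mapHead_id (xs : List (List Char)) :
    mapHead (fun p => p) xs = xs := by
  cases xs <;> simp [mapHead]

theorem drop_one_mapHead (f : List Char → List Char) (xs : List (List Char)) :
    (mapHead f xs).drop 1 = xs.drop 1 := by
  cases xs <;> simp [mapHead]

theorem splitOn_go_spec (fuel : Nat) :
    ∀ (l cur : List Char) (acc : List (List Char)), l.length < fuel →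
      PySem.Chars.splitOn.go ['$', '{'] fuel l cur acc
        = acc.reverse ++ mapHead (fun p => cur.reverse ++ p) (splitDollar l) := by
  induction fuel with
  | zero => intro l cur acc h; omega
  | succ f ih =>
      intro l cur acc h
      match l with
      | [] =>
          simp [PySem.Chars.splitOn.go, splitDollar, mapHead]
      | [c] =>
          have hpre : List.isPrefixOf ['$', '{'] [c] = false := by
            cases hc : c == '$' <;> simp_all [List.isPrefixOf]
          rw [PySem.Chars.splitOn.go]
          simp only [hpre, Bool.false_eq_true, if_false]
          rw [ih [] (c :: cur) acc (by simpa using Nat.lt_of_succ_lt_succ (by simpa using h))]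
          simp [splitDollar, mapHead]
      | c1 :: c2 :: rest =>
          by_cases hp : c1 = '$' ∧ c2 = '{'
          · obtain ⟨h1, h2⟩ := hp
            subst h1; subst h2
            have hpre : List.isPrefixOf ['$', '{'] ('$' :: '{' :: rest) = true := by
              simp [List.isPrefixOf]
            rw [PySem.Chars.splitOn.go]
            simp only [hpre, if_true]
            rw [ih _ [] _ (by simp at h ⊢; omega)]
            rw [show List.drop (['$', '{'] : List Char).length ('$' :: '{' :: rest) = rest
                  from rfl]
            have h1 : mapHead (fun p => List.reverse ([] : List Char) ++ p)
                (splitDollar rest) = splitDollar rest := by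
              simp only [List.reverse_nil, List.nil_append]
              exact mapHead_id _
            rw [h1, splitDollar.eq_3]
            simp [mapHead]
          · have hb : (c1 == '$' && c2 == '{') = false := by
              by_cases h1 : c1 = '$'
              · subst h1
                have h2 : ¬ c2 = '{' := fun h2 => hp ⟨rfl, h2⟩
                simp [h2]
              · simp [h1]
            have hpre : List.isPrefixOf ['$', '{'] (c1 :: c2 :: rest) = false := by
              by_cases h1 : c1 = '$'
              · subst h1
                have h2 : ¬ c2 = '{' := fun h2 => hp ⟨rfl, h2⟩
                have hb2 : ('{' == c2) = false := by
                  cases hx : ('{' == c2)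
                  · rfl
                  · exact absurd (eq_of_beq hx).symm h2
                simp [List.isPrefixOf, hb2]
              · have hb1 : ('$' == c1) = false := by
                  cases hx : ('$' == c1)
                  · rfl
                  · exact absurd (eq_of_beq hx).symm h1
                simp [List.isPrefixOf, hb1]
            rw [PySem.Chars.splitOn.go]
            simp only [hpre, Bool.false_eq_true, if_false]
            rw [ih (c2 :: rest) (c1 :: cur) acc (by simp at h ⊢; omega)]
            rw [splitDollar.eq_3]
            simp only [hb, Bool.false_eq_true, if_false, mapHead_mapHead]
            simp [mapHead]
  -- fuel induction matching go's fuel argument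

theorem splitOn_eq_splitDollar (l : List Char) :
    PySem.Chars.splitOn l ['$', '{'] = splitDollar l := by
  unfold PySem.Chars.splitOn
  rw [splitOn_go_spec (l.length + 1) l [] [] (by omega)]
  simp only [List.reverse_nil, List.nil_append]
  rw [mapHead_id]

theorem isIn_close_eq_hasClose (p : List Char) :
    PySem.Chars.isIn ['}'] p = hasClose p := by
  rcases h : PySem.Chars.isIn ['}'] p with _ | _
  · rw [PySem.Chars.isIn_eq_false_iff] at h
    rw [List.singleton_infix_iff] at h
    simp [hasClose, h]
  · rw [PySem.Chars.isIn_iff_infix] at h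
    rw [List.singleton_infix_iff] at h
    simp [hasClose, h]

-- the joint invariant: A's two reachable states against the split decomposition
theorem loopA_splitDollar (n : Nat) :
    ∀ l : List Char, l.length ≤ n →
      isValidLoopA l [] false = ((splitDollar l).drop 1).all hasClose ∧
      isValidLoopA l ["${"] true = (splitDollar l).all hasClose := by
  induction n with
  | zero =>
      intro l hl
      have : l = [] := by cases l <;> simp_all
      subst this
      simp [isValidLoopA, splitDollar, hasClose]
  | succ n ih =>
      intro l hl
      match l with
      | [] => simp [isValidLoopA, splitDollar, hasClose]
      | [c] =>
          constructor
          · simp [isValidLoopA, splitDollar]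
          · by_cases hc : c = '}'
            · subst hc; simp [isValidLoopA, splitDollar, hasClose]
            · have hcb : (c == '}') = false := by simp [hc]
              simp [isValidLoopA, splitDollar, hasClose, hcb, hc, eq_comm]
      | c1 :: c2 :: rest =>
          by_cases hp : c1 = '$' ∧ c2 = '{'
          · obtain ⟨h1, h2⟩ := hp; subst h1; subst h2
            have ih2 := ih rest (by simp at hl; omega)
            constructor
            · rw [isValidLoopA.eq_3, splitDollar.eq_3]
              simp [ih2.2]
            · rw [isValidLoopA.eq_3, splitDollar.eq_3]
              simp [hasClose]
          · have hb : (c1 == '$' && c2 == '{') = false := by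
              rcases hp' : (c1 == '$') with _ | _ <;>
                rcases hp'' : (c2 == '{') with _ | _ <;> simp_all
            have ih1 := ih (c2 :: rest) (by simp at hl ⊢; omega)
            obtain ⟨q, qs, hq⟩ :
                ∃ q qs, splitDollar (c2 :: rest) = q :: qs := by
              cases h : splitDollar (c2 :: rest) with
              | nil => exact absurd h (splitDollar_ne_nil _)
              | cons q qs => exact ⟨q, qs, rfl⟩
            constructor
            · rw [isValidLoopA.eq_3, splitDollar.eq_3]
              simp only [hb, Bool.false_eq_true, if_false, Bool.false_and]
              rw [drop_one_mapHead, ih1.1]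
            · rw [isValidLoopA.eq_3, splitDollar.eq_3]
              simp only [hb, Bool.false_eq_true, if_false, Bool.true_and]
              by_cases hc : c1 = '}'
              · subst hc
                simp only [BEq.rfl, if_true]
                simp [ih1.1, hq, mapHead, hasClose]
              · have hcb : (c1 == '}') = false := by simp [hc]
                simp only [hcb, Bool.false_eq_true, if_false]
                rw [ih1.2, hq]
                simp only [mapHead, List.all_cons]
                have : hasClose (c1 :: q) = hasClose q := by
                  simp [hasClose, hc, eq_comm]
                rw [this]

-- ===== VERDICT (by name: the statement is the Claim_ definition above) =====
theorem is_valid_substitution_spec : Claim_equal_is_valid_substitution := by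
  intro value _
  unfold Spec_is_valid_substitution is_valid_substitution is_valid_substitution_alt
  have hsep : "${".toList = ['$', '{'] := by decide
  have hcl : "}".toList = ['}'] := by decide
  rw [hsep, hcl, splitOn_eq_splitDollar]
  rw [(loopA_splitDollar value.toList.length value.toList le_rfl).1]
  simp [isIn_close_eq_hasClose]
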